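-- pv_equiv track=rewrite | github.com/oOOo-YKS/Dou_dizhu | intelligence.py | _consecutive_segments
-- ===== SOURCE A (Python) =====
-- def _consecutive_segments(sorted_ranks):
--     """Group consecutive ranks into segments."""
--     if not sorted_ranks:
--         return []
--     segs = [[sorted_ranks[0]]]
--     for r in sorted_ranks[1:]:
--         if r == segs[-1][-1] + 1:
--             segs[-1].append(r)
--         else:
--             segs.append([r])
--     return segs
-- ===== SOURCE B (Python) =====
-- def _consecutive_segments(sorted_ranks):
--     """Group consecutive ranks into segments: find run boundaries, then slice."""
--     n = len(sorted_ranks)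
--     if n == 0:
--         return []
--     bounds = [0] + [i for i in range(1, n)
--                     if sorted_ranks[i] != sorted_ranks[i - 1] + 1] + [n]
--     return [sorted_ranks[a:b] for a, b in zip(bounds, bounds[1:])]
-- ===== Notes on version B (the rewrite author's own statement) =====
-- stated objective: alternative
-- what changed: B scans once for run-boundary positions and slices the list between consecutive boundaries, instead of A's element-by-element growth of the last segment via repeated appends.
import Mathlib
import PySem

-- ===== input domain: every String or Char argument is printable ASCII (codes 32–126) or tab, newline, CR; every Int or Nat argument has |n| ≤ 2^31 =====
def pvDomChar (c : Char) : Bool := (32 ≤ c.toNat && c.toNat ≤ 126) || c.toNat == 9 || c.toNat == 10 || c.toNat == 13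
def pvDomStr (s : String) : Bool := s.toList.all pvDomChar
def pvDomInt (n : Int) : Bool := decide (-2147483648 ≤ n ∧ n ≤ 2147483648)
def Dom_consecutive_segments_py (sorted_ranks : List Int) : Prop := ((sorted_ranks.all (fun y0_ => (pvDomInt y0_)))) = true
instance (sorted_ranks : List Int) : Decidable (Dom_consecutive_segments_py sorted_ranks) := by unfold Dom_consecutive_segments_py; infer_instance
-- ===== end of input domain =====

-- B finds the run boundaries in one scan and slices between them, instead of A's
-- element-by-element growth of the last segment; the return values are proved equal.

-- ===== PORT A =====
-- one loop step of A: `segs[-1][-1]` read via getLastD (segs and its last segment are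
-- always nonempty in A, so the defaults are unreachable); `segs[-1].append(r)` is
-- "replace the last segment by itself ++ [r]".
def pvAStep (segs : List (List Int)) (r : Int) : List (List Int) :=
  if r = (segs.getLastD []).getLastD 0 + 1 then
    segs.dropLast ++ [segs.getLastD [] ++ [r]]
  else
    segs ++ [[r]]

def consecutive_segments_py (sorted_ranks : List Int) : List (List Int) :=
  match sorted_ranks with
  | [] => []
  | x :: rest => rest.foldl pvAStep [[x]]

-- ===== PORT B =====
-- indices i, i-1 taken from range(1, n) are always in range, so the pyGetD default 0
-- is unreachable (Python's sorted_ranks[i] never raises here).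
def consecutive_segments_py_alt (sorted_ranks : List Int) : List (List Int) :=
  let n : Int := PySem.List.len sorted_ranks
  if n = 0 then []
  else
    let bounds : List Int :=
      [0] ++ (PySem.List.pyRange 1 n 1).filter
          (fun i => PySem.List.pyGetD sorted_ranks i 0 != PySem.List.pyGetD sorted_ranks (i - 1) 0 + 1)
        ++ [n]
    (bounds.zip bounds.tail).map (fun p => PySem.List.slice sorted_ranks (some p.1) (some p.2))

-- ===== PRECONDITION & SPEC =====
def Spec_consecutive_segments_py (sorted_ranks : List Int) (out : List (List Int)) : Prop := out = consecutive_segments_py_alt sorted_ranks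
instance (sorted_ranks : List Int) (out : List (List Int)) : Decidable (Spec_consecutive_segments_py sorted_ranks out) := by unfold Spec_consecutive_segments_py; infer_instance

-- ===== CLAIM (what is proved, stated in full; the proofs are below) =====
def Claim_equal_consecutive_segments_py : Prop := ∀ (sorted_ranks : List Int), Dom_consecutive_segments_py sorted_ranks → Spec_consecutive_segments_py sorted_ranks (consecutive_segments_py sorted_ranks)

-- ===== LEMMAS AND PROOFS =====

-- intermediate "reference" segmentation, a right fold that conses onto the first segment
def pvBStep (r : Int) (segs : List (List Int)) : List (List Int) :=
  match segs with
  | (y :: t) :: rest => if y = r + 1 then (r :: y :: t) :: rest else [r] :: segs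
  | _ => [r] :: segs

def pvSeg (s : List Int) : List (List Int) := s.foldr pvBStep []

-- "continue the current segment `acc` (whose last element is `last`) into the already-built tail"
def pvGlue (acc : List Int) (last : Int) (segs : List (List Int)) : List (List Int) :=
  match segs with
  | (y :: t) :: rest => if y = last + 1 then (acc ++ y :: t) :: rest else acc :: segs
  | _ => [acc]

-- the fold never produces an empty segment
lemma pvSeg_nonnil : ∀ (xs : List Int) (seg : List Int), seg ∈ pvSeg xs → seg ≠ [] := by
  intro xs
  induction xs with
  | nil => intro seg h; simp [pvSeg] at h
  | cons y ys ih =>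
    intro seg h
    simp only [pvSeg, List.foldr] at h
    rcases hB : ys.foldr pvBStep [] with _ | ⟨s, rest⟩
    · rw [hB] at h; simp [pvBStep] at h; simp [h]
    · rw [hB] at h
      rcases s with _ | ⟨z, t⟩
      · exact absurd rfl (ih [] (by rw [pvSeg, hB]; simp))
      · by_cases hc : z = y + 1
        · simp only [pvBStep, if_pos hc, List.mem_cons] at h
          rcases h with h | h
          · subst h; simp
          · exact ih seg (by rw [pvSeg, hB]; exact List.mem_cons_of_mem _ h)
        · simp only [pvBStep, if_neg hc, List.mem_cons] at h
          rcases h with h | h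
          · subst h; simp
          · exact ih seg (by rw [pvSeg, hB]; simp [List.mem_cons]; tauto)

lemma pvGlue_step (acc : List Int) (last y : Int) (segs : List (List Int))
    (hne : ∀ seg ∈ segs, seg ≠ []) :
    pvGlue acc last (pvBStep y segs) =
      if y = last + 1 then pvGlue (acc ++ [y]) y segs else acc :: pvGlue [y] y segs := by
  rcases segs with _ | ⟨s, rest⟩
  · by_cases h : y = last + 1 <;> simp [pvBStep, pvGlue, h]
  · rcases s with _ | ⟨z, t⟩
    · exact absurd rfl (hne [] (List.mem_cons_self))
    · by_cases hzy : z = y + 1 <;> by_cases hyl : y = last + 1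
      · subst hzy hyl; simp [pvBStep, pvGlue]
      · subst hzy; simp [pvBStep, pvGlue, hyl]
      · subst hyl
        have hz : z ≠ last + 1 + 1 := hzy
        simp [pvBStep, pvGlue, hz]
      · simp [pvBStep, pvGlue, hzy, hyl]

-- the foldl invariant for A's loop
lemma pvFoldA (xs : List Int) : ∀ (pre : List (List Int)) (a : List Int) (last : Int),
    List.foldl pvAStep (pre ++ [a ++ [last]]) xs =
      pre ++ pvGlue (a ++ [last]) last (pvSeg xs) := by
  induction xs with
  | nil => intro pre a last; simp [pvSeg, pvGlue]
  | cons y ys ih =>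
    intro pre a last
    have hstep : pvAStep (pre ++ [a ++ [last]]) y =
        if y = last + 1 then pre ++ [(a ++ [last]) ++ [y]]
        else (pre ++ [a ++ [last]]) ++ [[y]] := by
      simp [pvAStep]
    simp only [List.foldl_cons, hstep]
    have hB : pvSeg (y :: ys) = pvBStep y (pvSeg ys) := rfl
    rw [hB, pvGlue_step _ _ _ _ (pvSeg_nonnil ys)]
    split
    · rw [List.append_assoc a [last] [y]]
      have := ih pre (a ++ [last]) y
      simpa using this
    · rw [show ((pre ++ [a ++ [last]]) ++ [[y]] :
            List (List Int)) = (pre ++ [a ++ [last]]) ++ [([] : List Int) ++ [y]] by simp]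
      rw [ih (pre ++ [a ++ [last]]) [] y]
      simp

lemma pvGlue_base (x : Int) (segs : List (List Int)) (hne : ∀ seg ∈ segs, seg ≠ []) :
    pvGlue [x] x segs = pvBStep x segs := by
  rcases segs with _ | ⟨s, rest⟩
  · rfl
  · rcases s with _ | ⟨z, t⟩
    · exact absurd rfl (hne [] (List.mem_cons_self))
    · simp only [pvGlue, pvBStep]
      by_cases h : z = x + 1 <;> simp [h]

lemma pvA_eq_seg (s : List Int) : consecutive_segments_py s = pvSeg s := by
  rcases s with _ | ⟨x, rest⟩
  · rfl
  · show rest.foldl pvAStep [[x]] = pvSeg (x :: rest)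
    have h := pvFoldA rest [] [] x
    simp only [List.nil_append] at h
    rw [h, pvGlue_base x _ (pvSeg_nonnil rest)]
    rfl

-- ---- Nat-level view of B: break positions, bounds, slices ----
def pvBrk (s : List Int) : List Nat :=
  (List.range' 1 (s.length - 1)).filter (fun i => s.getD i 0 != s.getD (i - 1) 0 + 1)

def pvBounds (s : List Int) : List Nat := pvBrk s ++ [s.length]

def pvSegsN (s : List Int) : List (List Int) :=
  ((0 :: pvBounds s).zip (pvBounds s)).map (fun p => (s.drop p.1).take (p.2 - p.1))

-- B's port computes pvSegsN on nonempty input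
lemma pvAlt_eq_segsN (s : List Int) (hs : s ≠ []) :
    consecutive_segments_py_alt s = pvSegsN s := by
  have hL : s.length ≠ 0 := by simpa [List.length_eq_zero_iff] using hs
  have hfil : (PySem.List.pyRange 1 (s.length : Int) 1).filter
        (fun i => PySem.List.pyGetD s i 0 != PySem.List.pyGetD s (i - 1) 0 + 1)
      = (pvBrk s).map (fun k : Nat => (k : Int)) := by
    rw [PySem.List.pyRange_one]
    have h1 : ((s.length : Int) - 1).toNat = s.length - 1 := by omega
    rw [h1, pvBrk, List.range'_eq_map_range, List.filter_map, List.filter_map]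
    have hpred : ((fun i => PySem.List.pyGetD s i 0 != PySem.List.pyGetD s (i - 1) 0 + 1) ∘ fun k : Nat => (1:Int) + ↑k)
        = ((fun i => s.getD i 0 != s.getD (i - 1) 0 + 1) ∘ fun x : Nat => 1 + x) := by
      funext k
      simp only [Function.comp_apply]
      have e1 : (1:Int) + (k:Int) = ((1 + k : Nat) : Int) := by push_cast; ring
      have e2 : ((1 + k : Nat) : Int) - 1 = ((k : Nat) : Int) := by push_cast; ring
      rw [e1, e2, PySem.List.pyGetD_natCast, PySem.List.pyGetD_natCast]
      have e3 : 1 + k - 1 = k := by omega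
      rw [e3]
    rw [hpred, List.map_map]
    apply List.map_congr_left
    intro k _
    simp only [Function.comp_apply]
    push_cast
    ring
  have hbounds : ([0] ++ (pvBrk s).map (fun k : Nat => (k : Int)) ++ [(s.length : Int)])
      = (0 :: pvBounds s).map (fun k : Nat => (k : Int)) := by
    simp [pvBounds]
  unfold consecutive_segments_py_alt
  rw [if_neg (by simp [PySem.List.len_eq]; omega)]
  simp only [PySem.List.len_eq, hfil, hbounds]
  rw [← List.map_tail, List.zip_map, List.map_map]
  rw [pvSegsN]
  apply List.map_congr_left
  intro p _
  simp [Function.comp, PySem.List.slice_natCast]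
lemma pvBrk_cons (x : Int) (xs : List Int) (hxs : xs ≠ []) :
    pvBrk (x :: xs) =
      (if xs.getD 0 0 = x + 1 then [] else [1]) ++ (pvBrk xs).map (· + 1) := by
  have hL : xs.length ≠ 0 := by simpa [List.length_eq_zero_iff] using hxs
  unfold pvBrk
  have h1 : (x :: xs).length - 1 = xs.length := by simp
  rw [h1]
  have h2 : List.range' 1 xs.length = 1 :: List.range' 2 (xs.length - 1) := by
    rw [show xs.length = (xs.length - 1) + 1 by omega, List.range'_succ]
    norm_num
  rw [h2, List.filter_cons]
  have h3 : List.range' 2 (xs.length - 1) = (List.range' 1 (xs.length - 1)).map (· + 1) := by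
    rw [List.range'_eq_map_range, List.range'_eq_map_range, List.map_map]
    apply List.map_congr_left; intro k _; simp; omega
  rw [h3, List.filter_map]
  have hpred : ∀ i ∈ List.range' 1 (xs.length - 1),
      ((fun i => (x :: xs).getD i 0 != (x :: xs).getD (i - 1) 0 + 1) ∘ (· + 1)) i
        = (fun i => xs.getD i 0 != xs.getD (i - 1) 0 + 1) i := by
    intro i hi
    have h1i : 1 ≤ i := (List.mem_range'_1.mp hi).1
    simp only [Function.comp_apply]
    have e1 : (x :: xs).getD (i + 1) 0 = xs.getD i 0 := by simp
    have e2 : (x :: xs).getD (i + 1 - 1) 0 = xs.getD (i - 1) 0 := by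
      rw [show i + 1 - 1 = (i - 1) + 1 by omega]
      simp
    rw [e1, e2]
  rw [List.filter_congr hpred]
  by_cases hc : xs.getD 0 0 = x + 1 <;> simp [List.getD] <;> split <;> simp_all
lemma pvBounds_mem_pos (xs : List Int) (hxs : xs ≠ []) :
    ∀ b ∈ pvBounds xs, 1 ≤ b := by
  intro b hb
  rcases List.mem_append.mp hb with h | h
  · have := List.mem_range'_1.mp (List.mem_of_mem_filter h)
    omega
  · have hL : xs.length ≠ 0 := by simpa [List.length_eq_zero_iff] using hxs
    simp at h; omega
lemma pvSegsN_eq_seg : ∀ (s : List Int), s ≠ [] → pvSegsN s = pvSeg s := by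
  intro s
  induction s with
  | nil => intro h; exact absurd rfl h
  | cons x xs ih =>
    intro _
    rcases xs with _ | ⟨y, ys⟩
    · simp [pvSegsN, pvBounds, pvBrk, pvSeg, pvBStep]
    · have hxs : (y :: ys) ≠ [] := by simp
      have hIH := ih hxs
      rcases hBB : pvBounds (y :: ys) with _ | ⟨b0, B'⟩
      · exact absurd hBB (by simp [pvBounds])
      have hb0 : 1 ≤ b0 := pvBounds_mem_pos _ hxs b0 (by rw [hBB]; exact List.mem_cons_self)
      obtain ⟨k, rfl⟩ : ∃ k, b0 = k + 1 := ⟨b0 - 1, by omega⟩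
      set f : Nat × Nat → List Int := fun p => ((x :: y :: ys).drop p.1).take (p.2 - p.1) with hf
      set g : Nat × Nat → List Int := fun p => ((y :: ys).drop p.1).take (p.2 - p.1) with hg
      have hpm : ∀ (l1 l2 : List Nat),
          List.map f (List.zip (List.map (· + 1) l1) (List.map (· + 1) l2)) =
            List.map g (List.zip l1 l2) := by
        intro l1 l2
        rw [List.zip_map, List.map_map]
        apply List.map_congr_left
        intro p _
        simp [hf, hg, Prod.map, Nat.succ_sub_succ]
      have hN : pvSegsN (y :: ys) =
          (y :: List.take k ys) :: List.map g (List.zip ((k+1) :: B') B') := by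
        rw [pvSegsN, hBB]
        simp [hg]
      have hSegIH : pvSeg (y :: ys) =
          (y :: List.take k ys) :: List.map g (List.zip ((k+1) :: B') B') := by
        rw [← hIH, hN]
      by_cases hc : y = x + 1
      · have hBc : pvBounds (x :: y :: ys) = List.map (· + 1) ((k+1) :: B') := by
          rw [pvBounds, pvBrk_cons x _ hxs]
          simp only [List.getD_cons_zero, if_pos hc, List.nil_append]
          rw [← hBB, pvBounds, List.map_append]
          simp
        have hL : pvSegsN (x :: y :: ys) =
            (x :: y :: List.take k ys) :: List.map g (List.zip ((k+1) :: B') B') := by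
          rw [pvSegsN, hBc]
          simp only [List.map_cons, List.zip_cons_cons, List.map_cons]
          rw [show ((k+1+1) :: List.map (· + 1) B' : List Nat) = List.map (· + 1) ((k+1) :: B') by simp]
          rw [hpm]
          congr 1
        rw [hL]
        show _ = pvBStep x (pvSeg (y :: ys))
        rw [hSegIH, pvBStep, if_pos hc]
      · have hBc : pvBounds (x :: y :: ys) = 1 :: List.map (· + 1) ((k+1) :: B') := by
          rw [pvBounds, pvBrk_cons x _ hxs]
          simp only [List.getD_cons_zero, if_neg hc]
          rw [← hBB, pvBounds, List.map_append]
          simp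
        have hL : pvSegsN (x :: y :: ys) = [x] :: pvSegsN (y :: ys) := by
          rw [pvSegsN, hBc]
          simp only [List.zip_cons_cons, List.map_cons]
          rw [show ((k+1+1) :: List.map (· + 1) B' : List Nat) = List.map (· + 1) ((k+1) :: B') by simp]
          rw [hpm, hN]
          simp
        rw [hL]
        show _ = pvBStep x (pvSeg (y :: ys))
        rw [hSegIH, pvBStep, if_neg hc, ← hSegIH, hIH]
-- ===== VERDICT (by name: the statement is the Claim_ definition above) =====
theorem consecutive_segments_py_spec : Claim_equal_consecutive_segments_py := by
  intro sorted_ranks _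
  unfold Spec_consecutive_segments_py
  rcases hs : sorted_ranks with _ | ⟨x, rest⟩
  · rfl
  · rw [pvA_eq_seg, pvAlt_eq_segsN _ (by simp), pvSegsN_eq_seg _ (by simp)]
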